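-- pv_equiv track=rewrite | github.com/mrsxman/asadshakx_sh | massiv.py | seriyalarni_nolga_almashtir
-- ===== SOURCE A (Python) =====
-- def seriyalarni_nolga_almashtir(massiv, K):
--     n = len(massiv)
--     new_massiv = []
--
--     i = 0
--     while i < n:
--         # Seriyani topish
--         seriya_uzunligi = 0
--         while i + seriya_uzunligi < n and seriya_uzunligi < K:
--             seriya_uzunligi += 1
--
--         # Seriya uzunligi K dan katta bo'lsa, bitta elementni nolga almashtirish
--         if seriya_uzunligi >= K:
--             new_massiv.extend([0] * seriya_uzunligi)
--         else:
--             new_massiv.extend(massiv[i:i + seriya_uzunligi])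
--
--         i += seriya_uzunligi
--
--     return new_massiv
-- ===== SOURCE B (Python) =====
-- def seriyalarni_nolga_almashtir(massiv, K):
--     full = (len(massiv) // K) * K
--     return [0] * full + list(massiv[full:])
-- ===== Notes on version B (the rewrite author's own statement) =====
-- stated objective: simpler
-- what changed: Replaces the chunk-by-chunk while loop (with an inner counting loop per chunk) by a closed-form computation: the fully-chunked prefix length full = (len(massiv)//K)*K gives the result directly as [0]*full + massiv[full:].
-- outside the precondition, e.g. on seriyalarni_nolga_almashtir([], 0): A returns [], B raises ZeroDivisionError
import Mathlib
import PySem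

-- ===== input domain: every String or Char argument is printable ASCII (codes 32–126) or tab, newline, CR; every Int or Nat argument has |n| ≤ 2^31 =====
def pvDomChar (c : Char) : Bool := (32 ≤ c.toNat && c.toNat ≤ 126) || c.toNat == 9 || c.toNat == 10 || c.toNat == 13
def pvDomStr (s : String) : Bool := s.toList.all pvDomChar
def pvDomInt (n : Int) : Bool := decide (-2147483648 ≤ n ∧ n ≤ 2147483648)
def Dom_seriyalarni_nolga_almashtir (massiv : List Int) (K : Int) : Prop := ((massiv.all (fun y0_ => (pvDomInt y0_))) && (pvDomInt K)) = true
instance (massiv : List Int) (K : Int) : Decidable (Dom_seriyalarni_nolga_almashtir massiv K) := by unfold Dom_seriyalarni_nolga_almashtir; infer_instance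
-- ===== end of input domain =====

-- B replaces A's chunk-by-chunk while loop by the closed form [0]*((n//K)*K) + massiv[(n//K)*K:] (simpler, no loop).


-- ===== PORT A =====
-- inner while loop: 'while i + s < n and s < K: s += 1'
def pvSerLen (n K i s : Int) (fuel : Nat) : Int :=
  match fuel with
  | 0 => s
  | f + 1 => if i + s < n ∧ s < K then pvSerLen n K i (s + 1) f else s

-- outer while loop over i; fuel bounds the number of iterations (enough when K ≥ 1)
def pvOuter (massiv : List Int) (n K i : Int) (acc : List Int) (fuel : Nat) : List Int :=
  match fuel with
  | 0 => acc
  | f + 1 =>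
    if i < n then
      let s := pvSerLen n K i 0 n.toNat
      let acc' := if s ≥ K then acc ++ List.replicate s.toNat 0
                  else acc ++ PySem.List.slice massiv (some i) (some (i + s))
      pvOuter massiv n K (i + s) acc' f
    else acc

def seriyalarni_nolga_almashtir (massiv : List Int) (K : Int) : List Int :=
  pvOuter massiv (massiv.length : Int) K 0 [] (massiv.length + 1)

-- ===== PORT B =====
def seriyalarni_nolga_almashtir_alt (massiv : List Int) (K : Int) : List Int :=
  let full := PySem.Int.floordiv (massiv.length : Int) K * K
  List.replicate full.toNat 0 ++ PySem.List.slice massiv (some full) none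

-- ===== PRECONDITION & SPEC =====
-- Pre_ excludes K ≤ 0 with nonempty massiv, where A's outer loop never terminates, and K = 0
-- with empty massiv, where A returns [] but B's division by K raises ZeroDivisionError.
def Pre_seriyalarni_nolga_almashtir (massiv : List Int) (K : Int) : Prop :=
  1 ≤ K ∨ (massiv = [] ∧ K ≠ 0)
instance (massiv : List Int) (K : Int) : Decidable (Pre_seriyalarni_nolga_almashtir massiv K) := by
  unfold Pre_seriyalarni_nolga_almashtir; infer_instance

def pvWitness_seriyalarni_nolga_almashtir : List Int × Int := ([1, 2, 3, 4, 5], 2)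

def Spec_seriyalarni_nolga_almashtir (massiv : List Int) (K : Int) (out : List Int) : Prop := out = seriyalarni_nolga_almashtir_alt massiv K
instance (massiv : List Int) (K : Int) (out : List Int) : Decidable (Spec_seriyalarni_nolga_almashtir massiv K out) := by unfold Spec_seriyalarni_nolga_almashtir; infer_instance

-- ===== CLAIM (what is proved, stated in full; the proofs are below) =====
def Claim_equal_seriyalarni_nolga_almashtir : Prop := ∀ (massiv : List Int) (K : Int), Dom_seriyalarni_nolga_almashtir massiv K → Pre_seriyalarni_nolga_almashtir massiv K → Spec_seriyalarni_nolga_almashtir massiv K (seriyalarni_nolga_almashtir massiv K)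

-- ===== LEMMAS AND PROOFS =====

-- the inner loop computes min (n - i) K
theorem pvSerLen_eq (n K i : Int) : ∀ (fuel : Nat) (s : Int), 0 ≤ s → s ≤ min (n - i) K →
    (min (n - i) K - s).toNat ≤ fuel → pvSerLen n K i s fuel = min (n - i) K := by
  intro fuel
  induction fuel with
  | zero => intro s h0 h1 h2; simp [pvSerLen]; omega
  | succ f ih =>
    intro s h0 h1 h2
    by_cases h : i + s < n ∧ s < K
    · rw [pvSerLen, if_pos h]
      exact ih (s + 1) (by omega) (by omega) (by omega)
    · rw [pvSerLen, if_neg h]; omega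

theorem pvOuter_eq (massiv : List Int) (n K : Int) (hK : 1 ≤ K) (hn : n = (massiv.length : Int)) :
    ∀ (fuel : Nat) (i : Int) (acc : List Int), 0 ≤ i → i ≤ n → (n - i).toNat < fuel →
    pvOuter massiv n K i acc fuel =
      acc ++ List.replicate ((n - i) / K * K).toNat 0 ++ massiv.drop (i + (n - i) / K * K).toNat := by
  intro fuel
  induction fuel with
  | zero => intro i acc _ _ h2; omega
  | succ f ih =>
    intro i acc h0 h1 h2
    by_cases hi : i < n
    · have hmin0 : (0:Int) ≤ min (n - i) K := by omega
      have hs : pvSerLen n K i 0 n.toNat = min (n - i) K := by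
        apply pvSerLen_eq n K i n.toNat 0 le_rfl (by omega) (by omega)
      rw [pvOuter, if_pos hi]
      by_cases hK2 : K ≤ n - i
      · -- full chunk of length K
        have hmin : min (n - i) K = K := by omega
        simp only [hs, hmin, ge_iff_le, if_pos (le_refl K)]
        have hdiv : (n - i) / K = (n - i - K) / K + 1 := by
          have := Int.add_mul_ediv_right (n - i - K) 1 (show K ≠ 0 by omega)
          simp at this; omega
        have hq : 0 ≤ (n - i - K) / K := Int.ediv_nonneg (by omega) (by omega)
        have hq2 : 0 ≤ (n - i - K) / K * K := mul_nonneg hq (by omega)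
        rw [ih (i + K) _ (by omega) (by omega) (by omega)]
        have harith : n - (i + K) = n - i - K := by ring_nf
        rw [harith]
        have hrep : List.replicate ((n - i) / K * K).toNat (0:Int) =
            List.replicate K.toNat 0 ++ List.replicate ((n - i - K) / K * K).toNat 0 := by
          rw [← List.replicate_add]
          congr 1
          have : (n - i) / K * K = K + (n - i - K) / K * K := by rw [hdiv]; ring
          omega
        rw [hrep]
        have hidx : i + K + (n - i - K) / K * K = i + (n - i) / K * K := by rw [hdiv]; ring
        rw [hidx]
        simp [List.append_assoc]
      · -- partial chunk of length n - i < K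
        have hmin : min (n - i) K = n - i := by omega
        simp only [hs, hmin, ge_iff_le, if_neg (show ¬ K ≤ n - i from hK2)]
        have hdiv0 : (n - i) / K = 0 := Int.ediv_eq_zero_of_lt (by omega) (by omega)
        have hslice : PySem.List.slice massiv (some i) (some (i + (n - i))) = massiv.drop i.toNat := by
          have : i + (n - i) = n := by ring
          rw [this, PySem.List.slice_toNat massiv (by omega) (by omega)]
          apply List.take_of_length_le
          simp; omega
        rw [hslice, show i + (n - i) = n by ring, ih n _ (by omega) (le_refl n) (by omega)]
        have hdone : (n - n) / K = 0 := by simp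
        rw [hdiv0, hdone]
        simp
        omega
    · have hie : i = n := by omega
      rw [pvOuter, if_neg hi, hie]
      simp
      omega

-- ===== VERDICT (by name: the statement is the Claim_ definition above) =====
theorem seriyalarni_nolga_almashtir_spec : Claim_equal_seriyalarni_nolga_almashtir := by
  unfold Claim_equal_seriyalarni_nolga_almashtir
  intro massiv K _ hpre
  unfold Spec_seriyalarni_nolga_almashtir seriyalarni_nolga_almashtir seriyalarni_nolga_almashtir_alt
  rcases hpre with hK | ⟨hnil, hK0⟩
  · rw [pvOuter_eq massiv (massiv.length : Int) K hK rfl (massiv.length + 1) 0 []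
        le_rfl (by positivity) (by omega)]
    have hfull0 : (0:Int) ≤ (massiv.length : Int) / K * K :=
      mul_nonneg (Int.ediv_nonneg (by positivity) (by omega)) (by omega)
    simp only [PySem.Int.floordiv_eq_ediv_of_pos (show (0:Int) < K by omega),
      PySem.List.slice_from massiv hfull0, sub_zero, zero_add, List.nil_append]
  · subst hnil
    simp [pvOuter, PySem.Int.floordiv, PySem.List.slice]
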